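-- pv_equiv track=rewrite | github.com/HCIS-Lab/RiskBench | risk_identification/Risk_identification_tool/utils/cal_metric.py | cal_IDsw
-- ===== SOURCE A (Python) =====
-- def cal_IDsw(roi_result):
--
--     IDcnt = 0
--     IDsw = 0
--
--     for scenario_weather in roi_result.keys():
--
--         pre_frame_info = None
--
--         for frame_id in roi_result[scenario_weather]:
--
--             cur_frame_info = roi_result[scenario_weather][str(frame_id)]
--             all_actor_id = list(cur_frame_info.keys())
--
--             for actor_id in all_actor_id:
--
--                 IDcnt += 1
--                 if not pre_frame_info is None:
--                     if actor_id in pre_frame_info and cur_frame_info[actor_id] != pre_frame_info[actor_id]: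
--                         IDsw += 1
--
--             pre_frame_info = cur_frame_info
--
--     return IDcnt, IDsw
-- ===== SOURCE B (Python) =====
-- def _track_switches(track):
--     # number of places where two consecutive slots are both present with different values
--     n = 0
--     for v, w in zip(track, track[1:]):
--         if v is not None and w is not None and v != w:
--             n += 1
--     return n
--
--
-- def cal_IDsw(roi_result):
--     IDcnt = 0
--     IDsw = 0
--     for sw in roi_result:
--         scen = roi_result[sw]
--         frames = [scen[str(fid)] for fid in scen]
--         IDcnt += sum(len(f) for f in frames)
--         # actor-centric: collect the distinct actor ids, then count switches
--         # on each actor's per-frame track (value or None) across the scenario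
--         actors = []
--         for f in frames:
--             for a in f:
--                 if a not in actors:
--                     actors.append(a)
--         for a in actors:
--             IDsw += _track_switches([f.get(a) for f in frames])
--     return IDcnt, IDsw
-- ===== Notes on version B (the rewrite author's own statement) =====
-- stated objective: alternative
-- what changed: Replaces A's frame-pair pass (threading the previous frame dict and scanning it for each actor of the current frame) by an actor-centric decomposition: collect the distinct actor ids of a scenario, build each actor's per-frame presence/value track, and count switches as adjacent present-present slots with different values.
import Mathlib
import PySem

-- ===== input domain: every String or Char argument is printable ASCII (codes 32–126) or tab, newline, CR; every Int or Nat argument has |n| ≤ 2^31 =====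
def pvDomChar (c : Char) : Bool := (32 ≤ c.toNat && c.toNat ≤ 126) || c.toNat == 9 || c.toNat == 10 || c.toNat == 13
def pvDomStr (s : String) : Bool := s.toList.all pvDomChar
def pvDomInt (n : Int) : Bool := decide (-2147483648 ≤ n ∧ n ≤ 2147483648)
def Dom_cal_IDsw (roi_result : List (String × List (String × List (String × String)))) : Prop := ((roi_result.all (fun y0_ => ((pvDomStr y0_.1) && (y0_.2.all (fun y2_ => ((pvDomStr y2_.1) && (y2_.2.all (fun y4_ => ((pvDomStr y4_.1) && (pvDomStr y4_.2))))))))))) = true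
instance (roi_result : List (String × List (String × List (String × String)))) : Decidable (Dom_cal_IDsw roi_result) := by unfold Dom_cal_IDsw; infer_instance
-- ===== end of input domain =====

-- B is actor-centric instead of A's frame-pair pass: per scenario it collects the distinct
-- actor ids, builds each actor's per-frame presence/value track, and counts switches as
-- adjacent present-present slots with different values; same result, different traversal.

-- shared input marshalling: the Python argument is a dict of dicts of dicts
def pvToDict (roi_result : List (String × List (String × List (String × String)))) :
    PySem.Dict String (PySem.Dict String (PySem.Dict String String)) :=
  PySem.Dict.ofList (roi_result.map (fun sw =>
    (sw.1, PySem.Dict.ofList (sw.2.map (fun fr => (fr.1, PySem.Dict.ofList fr.2))))))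

-- ===== PORT A =====
def cal_IDsw (roi_result : List (String × List (String × List (String × String)))) : Int × Int :=
  let d := pvToDict roi_result
  d.items.foldl (fun (acc : Int × Int) sw =>
    -- pre_frame_info = None; the frame loop threads (IDcnt, IDsw, pre_frame_info)
    let scen := d.getD sw.1 PySem.Dict.empty
    let res :=
      scen.items.foldl
        (fun (st : Int × Int × Option (PySem.Dict String String)) fr =>
          let cur := scen.getD fr.1 PySem.Dict.empty  -- roi_result[sw][str(frame_id)]; key present, default unreachable
          let all_actor_id := cur.keys
          let st2 :=
            all_actor_id.foldl
              (fun (p : Int × Int) a =>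
                (p.1 + 1,
                  p.2 + (match st.2.2 with
                    | none => 0
                    | some pre =>
                        if pre.contains a && (cur.getD a "" != pre.getD a "") then 1 else 0)))
              (st.1, st.2.1)
          (st2.1, st2.2, some cur))
        (acc.1, acc.2, none)
    (res.1, res.2.1)) (0, 0)

-- ===== PORT B =====
-- number of places where two consecutive slots of a track are both present with different values
def pvTrackSwitches (track : List (Option String)) : Int :=
  (track.zip track.tail).foldl
    (fun n vw => n + (match vw.1, vw.2 with
      | some v, some w => if v != w then 1 else 0
      | _, _ => 0)) 0

def cal_IDsw_alt (roi_result : List (String × List (String × List (String × String)))) : Int × Int :=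
  let d := pvToDict roi_result
  d.items.foldl (fun (acc : Int × Int) sw =>
    let scen := d.getD sw.1 PySem.Dict.empty
    let frames := scen.items.map (fun fr => scen.getD fr.1 PySem.Dict.empty)
    let cnt := frames.foldl (fun s f => s + (f.size : Int)) 0
    let actors := frames.foldl (fun (ac : List String) f =>
      f.keys.foldl (fun ac a => if ac.contains a then ac else ac ++ [a]) ac) []
    let sws := actors.foldl
      (fun s a => s + pvTrackSwitches (frames.map (fun f => f.get? a))) 0
    (acc.1 + cnt, acc.2 + sws)) (0, 0)

-- ===== PRECONDITION & SPEC =====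
def Spec_cal_IDsw (roi_result : List (String × List (String × List (String × String)))) (out : Int × Int) : Prop := out = cal_IDsw_alt roi_result
instance (roi_result : List (String × List (String × List (String × String)))) (out : Int × Int) : Decidable (Spec_cal_IDsw roi_result out) := by unfold Spec_cal_IDsw; infer_instance

-- ===== CLAIM =====
def Claim_equal_cal_IDsw : Prop := ∀ (roi_result : List (String × List (String × List (String × String)))), Dom_cal_IDsw roi_result → Spec_cal_IDsw roi_result (cal_IDsw roi_result)

-- ===== LEMMAS AND PROOFS =====

-- switches contributed by one consecutive frame pair (as A counts them)
def pvSwCount (prev cur : PySem.Dict String String) : Int :=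
  cur.keys.foldl
    (fun s a => s + (if prev.contains a && (cur.getD a "" != prev.getD a "") then 1 else 0)) 0

-- switches contributed by one frame given the optional previous frame
def pvOptSw (pre : Option (PySem.Dict String String)) (cur : PySem.Dict String String) : Int :=
  match pre with
  | none => 0
  | some p => pvSwCount p cur

-- switch count of a frame list threaded from an optional previous frame
def pvPairCnt (pre : Option (PySem.Dict String String)) :
    List (PySem.Dict String String) → Int
  | [] => 0
  | f :: rest => pvOptSw pre f + pvPairCnt (some f) rest

-- last frame after threading from an optional previous frame
def pvLastFrame (pre : Option (PySem.Dict String String)) :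
    List (PySem.Dict String String) → Option (PySem.Dict String String)
  | [] => pre
  | f :: r => pvLastFrame (some f) r

-- one slot comparison of a track
def pvCmp (v w : Option String) : Int :=
  match v, w with
  | some v, some w => if v != w then 1 else 0
  | _, _ => 0

-- track switch count threaded from an optional previous slot
def pvT (prev : Option String) : List (Option String) → Int
  | [] => 0
  | o :: r => pvCmp prev o + pvT o r

-- a (count, add) pair fold splits into length and a plain sum
theorem pv_pairfold (l : List String) (g : String → Int) (c s : Int) :
    l.foldl (fun (p : Int × Int) a => (p.1 + 1, p.2 + g a)) (c, s)
      = (c + (l.length : Int), s + (l.map g).sum) := by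
  induction l generalizing c s with
  | nil => simp
  | cons a t ih =>
      simp only [List.foldl_cons, List.map_cons, List.sum_cons, List.length_cons]
      rw [ih]
      simp only [Prod.mk.injEq]
      exact ⟨by push_cast; ring, by ring⟩

-- A's innermost actor loop adds the key count and the per-pair switch count
theorem pv_inner_eq (cur : PySem.Dict String String)
    (pre : Option (PySem.Dict String String)) (c s : Int) :
    cur.keys.foldl
      (fun (p : Int × Int) a =>
        (p.1 + 1,
          p.2 + (match pre with
            | none => 0
            | some q => if q.contains a && (cur.getD a "" != q.getD a "") then 1 else 0)))
      (c, s)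
    = (c + (cur.size : Int), s + pvOptSw pre cur) := by
  have hlen : (cur.keys.length : Int) = (cur.size : Int) := by
    simp [PySem.Dict.keys, PySem.Dict.size]
  cases pre with
  | none =>
      rw [pv_pairfold cur.keys (fun _ => 0)]
      simp [pvOptSw, hlen]
  | some q =>
      rw [pv_pairfold cur.keys
        (fun a => if q.contains a && (cur.getD a "" != q.getD a "") then 1 else 0)]
      rw [hlen]
      simp only [pvOptSw, pvSwCount]
      rw [PySem.List.foldl_add]
      simp

-- A's frame loop from an arbitrary accumulator, frames fetched by g from the iterated list
theorem pv_frames_eq {β : Type} (l : List β) (g : β → PySem.Dict String String)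
    (pre : Option (PySem.Dict String String)) (c s : Int) :
    l.foldl
      (fun (st : Int × Int × Option (PySem.Dict String String)) fr =>
        let cur := g fr
        let all_actor_id := cur.keys
        let st2 :=
          all_actor_id.foldl
            (fun (p : Int × Int) a =>
              (p.1 + 1,
                p.2 + (match st.2.2 with
                  | none => 0
                  | some pre =>
                      if pre.contains a && (cur.getD a "" != pre.getD a "") then 1 else 0)))
            (st.1, st.2.1)
        (st2.1, st2.2, some cur))
      (c, s, pre)
    = (c + (l.map (fun fr => ((g fr).size : Int))).sum, s + pvPairCnt pre (l.map g),
        pvLastFrame pre (l.map g)) := by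
  induction l generalizing pre c s with
  | nil => simp [pvPairCnt, pvLastFrame]
  | cons fr rest ih =>
      simp only [List.foldl_cons, List.map_cons, List.sum_cons, pvPairCnt, pvLastFrame]
      rw [pv_inner_eq (g fr) pre c s, ih]
      simp only [Prod.mk.injEq]
      exact ⟨by ring, by ring, trivial⟩

-- folds with pointwise-equal steps agree
theorem pv_foldl_ext {α β : Type} (f h : α → β → α)
    (hfg : ∀ acc x, f acc x = h acc x) (l : List β) (acc : α) :
    l.foldl f acc = l.foldl h acc := by
  induction l generalizing acc with
  | nil => rfl
  | cons x t ih => simp only [List.foldl_cons, hfg]; exact ih _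

-- B's zip pass over a track computes the threaded comparison count
theorem pv_zip_track (l : List (Option String)) (o : Option String) (s0 : Int) :
    ((o :: l).zip l).foldl (fun n vw => n + pvCmp vw.1 vw.2) s0 = s0 + pvT o l := by
  induction l generalizing o s0 with
  | nil => simp [pvT]
  | cons x r ih =>
      simp only [List.zip_cons_cons, List.foldl_cons]
      rw [ih x (s0 + pvCmp o x)]
      simp only [pvT]
      ring

theorem pv_track_eq (track : List (Option String)) :
    pvTrackSwitches track = pvT none track := by
  cases track with
  | nil => simp [pvTrackSwitches, pvT]
  | cons x r =>
      unfold pvTrackSwitches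
      simp only [List.tail_cons]
      show ((x :: r).zip r).foldl (fun n vw => n + pvCmp vw.1 vw.2) 0 = pvT none (x :: r)
      rw [pv_zip_track r x 0]
      simp [pvT, pvCmp]

-- a nodup sum restricts to a nodup sublist outside which the summand vanishes
theorem pv_sum_restrict (g : String → Int) (K A : List String)
    (hK : K.Nodup) (hA : A.Nodup) (hsub : ∀ a ∈ K, a ∈ A)
    (hz : ∀ a ∈ A, a ∉ K → g a = 0) :
    (A.map g).sum = (K.map g).sum := by
  rw [← List.sum_toFinset _ hA, ← List.sum_toFinset _ hK]
  refine (Finset.sum_subset ?_ ?_).symm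
  · intro a ha
    simp only [List.mem_toFinset] at *
    exact hsub a ha
  · intro a ha hna
    simp only [List.mem_toFinset] at *
    exact hz a ha hna

-- per-pair switch count as a sum over any distinct superset of the current frame's keys
theorem pv_sw_as_sum (p f : PySem.Dict String String) (hf : f.keys.Nodup)
    (A : List String) (hA : A.Nodup) (hsub : ∀ a ∈ f.keys, a ∈ A) :
    (A.map (fun a => pvCmp (p.get? a) (f.get? a))).sum = pvSwCount p f := by
  unfold pvSwCount
  rw [PySem.List.foldl_add]
  simp only [zero_add]
  rw [pv_sum_restrict (fun a => pvCmp (p.get? a) (f.get? a)) f.keys A hf hA hsub]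
  · refine congrArg _ (List.map_congr_left ?_)
    intro a ha
    have hfa : f.get? a = some (f.getD a "") := by
      cases h : f.get? a with
      | none =>
          exact absurd ((PySem.Dict.get?_eq_none_iff_not_mem_keys f a).mp h)
            (not_not_intro ha)
      | some v =>
          rw [PySem.Dict.getD_of_get?_eq_some f "" h]
    rw [hfa]
    cases hp : p.get? a with
    | none =>
        have : p.contains a = false := by
          rw [PySem.Dict.contains_eq_isSome_get?, hp]; rfl
        simp [pvCmp, this]
    | some w =>
        have hc : p.contains a = true := by
          rw [PySem.Dict.contains_eq_isSome_get?, hp]; rfl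
        rw [PySem.Dict.getD_of_get?_eq_some p "" hp]
        by_cases hvw : w = f.getD a ""
        · simp [pvCmp, hc, hvw]
        · simp [pvCmp, hc, hvw, Ne.symm hvw]
  · intro a _ hna
    have : f.get? a = none := (PySem.Dict.get?_eq_none_iff_not_mem_keys f a).mpr hna
    simp [pvCmp, this]

-- the exchange: summing each actor's threaded track count over a distinct, complete
-- actor list equals the frame-pair threaded count
theorem pv_exchange (frames : List (PySem.Dict String String))
    (hnd : ∀ f ∈ frames, f.keys.Nodup)
    (A : List String) (hA : A.Nodup)
    (hsub : ∀ f ∈ frames, ∀ a ∈ f.keys, a ∈ A)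
    (pre : Option (PySem.Dict String String)) :
    (A.map (fun a => pvT (pre.bind (fun p => p.get? a)) (frames.map (fun f => f.get? a)))).sum
      = pvPairCnt pre frames := by
  induction frames generalizing pre with
  | nil => simp [pvT, pvPairCnt]
  | cons f r ih =>
      simp only [List.map_cons, pvT, pvPairCnt]
      rw [List.sum_map_add]
      have h2 : (A.map (fun a => pvT (f.get? a) (r.map (fun f => f.get? a)))).sum
          = pvPairCnt (some f) r := by
        have := ih (fun g hg => hnd g (List.mem_cons_of_mem _ hg))
          (fun g hg => hsub g (List.mem_cons_of_mem _ hg)) (some f)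
        simpa using this
      rw [h2]
      congr 1
      cases pre with
      | none => simp [pvCmp, pvOptSw]
      | some p =>
          simp only [Option.bind_some, pvOptSw]
          exact pv_sw_as_sum p f (hnd f (List.mem_cons_self))
            A hA (hsub f (List.mem_cons_self))

-- Dict.ofList is a left fold of inserts (definitional)
theorem pv_ofList_eq_foldl {ν : Type} (l : List (String × ν)) :
    PySem.Dict.ofList l = l.foldl (fun d p => d.insert p.1 p.2) PySem.Dict.empty := rfl

-- a getD on a dict built by an insert loop yields the start's value or a listed value
theorem pv_getD_foldl_insert {ν : Type} (l : List (String × ν)) (d : PySem.Dict String ν)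
    (k : String) (dflt : ν) :
    (l.foldl (fun d p => d.insert p.1 p.2) d).getD k dflt = d.getD k dflt
      ∨ ∃ p ∈ l, (l.foldl (fun d p => d.insert p.1 p.2) d).getD k dflt = p.2 := by
  induction l generalizing d with
  | nil => exact Or.inl rfl
  | cons q t ih =>
      simp only [List.foldl_cons]
      rcases ih (d.insert q.1 q.2) with h | ⟨p, hp, h⟩
      · rw [PySem.Dict.getD_insert] at h
        by_cases hk : k = q.1
        · exact Or.inr ⟨q, List.mem_cons_self, by rw [h]; simp [hk]⟩
        · exact Or.inl (by rw [h]; simp [hk])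
      · exact Or.inr ⟨p, List.mem_cons_of_mem _ hp, h⟩

theorem pv_getD_ofList {ν : Type} (l : List (String × ν)) (k : String) (dflt : ν) :
    (PySem.Dict.ofList l).getD k dflt = dflt
      ∨ ∃ p ∈ l, (PySem.Dict.ofList l).getD k dflt = p.2 := by
  rw [pv_ofList_eq_foldl]
  rcases pv_getD_foldl_insert l PySem.Dict.empty k dflt with h | h
  · exact Or.inl (by rw [h, PySem.Dict.getD_empty])
  · exact Or.inr h

-- every frame dict obtained by B's lookups has unique keys
theorem pv_frame_keys_nodup (roi : List (String × List (String × List (String × String))))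
    (sw1 k : String) :
    (((pvToDict roi).getD sw1 PySem.Dict.empty).getD k PySem.Dict.empty).keys.Nodup := by
  unfold pvToDict
  rcases pv_getD_ofList (roi.map (fun sw =>
      (sw.1, PySem.Dict.ofList (sw.2.map (fun fr => (fr.1, PySem.Dict.ofList fr.2))))))
      sw1 PySem.Dict.empty with h | ⟨p, hp, h⟩
  · rw [h, PySem.Dict.getD_empty]
    exact PySem.Dict.nodup_keys_empty
  · rw [h]
    simp only [List.mem_map] at hp
    obtain ⟨q, hq, rfl⟩ := hp
    rcases pv_getD_ofList (q.2.map (fun fr => (fr.1, PySem.Dict.ofList fr.2)))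
        k PySem.Dict.empty with h2 | ⟨r, hr, h2⟩
    · rw [h2]
      exact PySem.Dict.nodup_keys_empty
    · rw [h2]
      simp only [List.mem_map] at hr
      obtain ⟨u, hu, rfl⟩ := hr
      exact PySem.Dict.nodup_keys_ofList _

-- membership in B's dedup-append accumulator (inner key loop)
theorem pv_addk_mem (l ac : List String) (x : String) :
    x ∈ l.foldl (fun ac a => if ac.contains a then ac else ac ++ [a]) ac
      ↔ x ∈ ac ∨ x ∈ l := by
  induction l generalizing ac with
  | nil => simp
  | cons a t ih =>
      simp only [List.foldl_cons]
      cases h : ac.contains a with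
      | true =>
          rw [if_pos rfl, ih]
          have ha : a ∈ ac := List.contains_iff_mem.mp h
          constructor
          · rintro (hx | hx)
            · exact Or.inl hx
            · exact Or.inr (List.mem_cons_of_mem _ hx)
          · rintro (hx | hx)
            · exact Or.inl hx
            · rcases List.mem_cons.mp hx with rfl | hx
              · exact Or.inl ha
              · exact Or.inr hx
      | false =>
          rw [if_neg (by simp), ih]
          simp only [List.mem_append, List.mem_cons]
          tauto

theorem pv_addk_nodup (l ac : List String) (hac : ac.Nodup) :
    (l.foldl (fun ac a => if ac.contains a then ac else ac ++ [a]) ac).Nodup := by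
  induction l generalizing ac with
  | nil => exact hac
  | cons a t ih =>
      simp only [List.foldl_cons]
      cases h : ac.contains a with
      | true => rw [if_pos rfl]; exact ih ac hac
      | false =>
          rw [if_neg (by simp)]
          refine ih _ ?_
          have ha : a ∉ ac := by
            intro hx
            rw [List.contains_iff_mem.mpr hx] at h
            cases h
          rw [List.nodup_append]
          refine ⟨hac, List.nodup_singleton a, ?_⟩
          intro y hy z hz
          rw [List.mem_singleton.mp hz]
          exact fun hya => ha (hya ▸ hy)

-- membership in B's actors list (outer frame loop)
theorem pv_actors_mem (frames : List (PySem.Dict String String)) (ac : List String)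
    (x : String) :
    x ∈ frames.foldl (fun ac f =>
        f.keys.foldl (fun ac a => if ac.contains a then ac else ac ++ [a]) ac) ac
      ↔ x ∈ ac ∨ ∃ f ∈ frames, x ∈ f.keys := by
  induction frames generalizing ac with
  | nil => simp
  | cons f r ih =>
      simp only [List.foldl_cons]
      rw [ih, pv_addk_mem]
      constructor
      · rintro ((hx | hx) | ⟨g, hg, hx⟩)
        · exact Or.inl hx
        · exact Or.inr ⟨f, List.mem_cons_self, hx⟩
        · exact Or.inr ⟨g, List.mem_cons_of_mem _ hg, hx⟩
      · rintro (hx | ⟨g, hg, hx⟩)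
        · exact Or.inl (Or.inl hx)
        · rcases List.mem_cons.mp hg with rfl | hg
          · exact Or.inl (Or.inr hx)
          · exact Or.inr ⟨g, hg, hx⟩

theorem pv_actors_nodup (frames : List (PySem.Dict String String)) (ac : List String)
    (hac : ac.Nodup) :
    (frames.foldl (fun ac f =>
        f.keys.foldl (fun ac a => if ac.contains a then ac else ac ++ [a]) ac) ac).Nodup := by
  induction frames generalizing ac with
  | nil => exact hac
  | cons f r ih => exact ih _ (pv_addk_nodup _ _ hac)

theorem cal_IDsw_spec : Claim_equal_cal_IDsw := by
  unfold Claim_equal_cal_IDsw Spec_cal_IDsw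
  intro roi _
  unfold cal_IDsw cal_IDsw_alt
  dsimp only
  refine pv_foldl_ext _ _ ?_ _ _
  intro acc sw
  dsimp only
  rw [pv_frames_eq ((pvToDict roi).getD sw.1 PySem.Dict.empty).items
        (fun fr => ((pvToDict roi).getD sw.1 PySem.Dict.empty).getD fr.1 PySem.Dict.empty)]
  set scen := (pvToDict roi).getD sw.1 PySem.Dict.empty with hscen
  set frames := scen.items.map (fun fr => scen.getD fr.1 PySem.Dict.empty) with hframes
  have hnd : ∀ f ∈ frames, f.keys.Nodup := by
    intro f hf
    rw [hframes] at hf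
    simp only [List.mem_map] at hf
    obtain ⟨fr, _, rfl⟩ := hf
    exact pv_frame_keys_nodup roi sw.1 fr.1
  set actors := frames.foldl (fun ac f =>
      f.keys.foldl (fun ac a => if ac.contains a then ac else ac ++ [a]) ac) [] with hactors
  have hA : actors.Nodup := pv_actors_nodup frames [] List.nodup_nil
  have hsub : ∀ f ∈ frames, ∀ a ∈ f.keys, a ∈ actors := by
    intro f hf a ha
    rw [hactors, pv_actors_mem]
    exact Or.inr ⟨f, hf, ha⟩
  have hsws : actors.foldl
      (fun s a => s + pvTrackSwitches (frames.map (fun f => f.get? a))) 0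
      = pvPairCnt none frames := by
    rw [PySem.List.foldl_add]
    have hmap : actors.map (fun a => pvTrackSwitches (frames.map (fun f => f.get? a)))
        = actors.map (fun a =>
            pvT ((none : Option (PySem.Dict String String)).bind (fun p => p.get? a))
              (frames.map (fun f => f.get? a))) := by
      refine List.map_congr_left ?_
      intro a _
      rw [pv_track_eq]
      rfl
    rw [hmap, pv_exchange frames hnd actors hA hsub none]
    ring
  have hcnt : frames.foldl (fun s f => s + (f.size : Int)) 0
      = (scen.items.map (fun fr => ((scen.getD fr.1 PySem.Dict.empty).size : Int))).sum := by
    rw [PySem.List.foldl_add, hframes, List.map_map]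
    simp [Function.comp_def]
  simp only [Prod.mk.injEq]
  exact ⟨by rw [hcnt], by rw [hsws]⟩
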